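-- pv_equiv track=rewrite | github.com/Yunf-sudo/data | transfer_ai_full_review_bundle/scripts/ai_full_review_prelabel.py | canonicalize_text_label
-- ===== SOURCE A (Python) =====
-- from typing import Iterable, Sequence
--
-- def normalize_text(text: str) -> str:
--     cleaned = []
--     for char in text.lower():
--         cleaned.append(char if char.isalnum() else " ")
--     return " ".join("".join(cleaned).split())
--
-- def canonicalize_text_label(raw_label: str, alias_lookup: Sequence[tuple[str, tuple[str, ...]]]) -> str | None:
--     text = normalize_text(str(raw_label))
--     if not text:
--         return None
--     for label, aliases in alias_lookup:
--         if any(alias and alias in text for alias in aliases):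
--             return label
--     return None
-- ===== SOURCE B (Python) =====
-- def canonicalize_text_label(raw_label, alias_lookup):
--     # single-pass normalization: lowercase, keep alnum runs, single spaces between them
--     chars = []
--     pending = False
--     for ch in str(raw_label).lower():
--         if ch.isalnum():
--             if pending and chars:
--                 chars.append(" ")
--             chars.append(ch)
--             pending = False
--         else:
--             pending = True
--     if not chars:
--         return None
--     text = "".join(chars)
--     return next(
--         (label for label, aliases in alias_lookup
--          if any(alias and alias in text for alias in aliases)),
--         None,
--     )
-- ===== Notes on version B (the rewrite author's own statement) =====
-- stated objective: alternative
-- what changed: B normalizes in a single stateful pass (pending-space flag) instead of map + join/split, and selects the label with an idiomatic next() over a generator instead of an explicit loop with early return.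
import Mathlib
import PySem

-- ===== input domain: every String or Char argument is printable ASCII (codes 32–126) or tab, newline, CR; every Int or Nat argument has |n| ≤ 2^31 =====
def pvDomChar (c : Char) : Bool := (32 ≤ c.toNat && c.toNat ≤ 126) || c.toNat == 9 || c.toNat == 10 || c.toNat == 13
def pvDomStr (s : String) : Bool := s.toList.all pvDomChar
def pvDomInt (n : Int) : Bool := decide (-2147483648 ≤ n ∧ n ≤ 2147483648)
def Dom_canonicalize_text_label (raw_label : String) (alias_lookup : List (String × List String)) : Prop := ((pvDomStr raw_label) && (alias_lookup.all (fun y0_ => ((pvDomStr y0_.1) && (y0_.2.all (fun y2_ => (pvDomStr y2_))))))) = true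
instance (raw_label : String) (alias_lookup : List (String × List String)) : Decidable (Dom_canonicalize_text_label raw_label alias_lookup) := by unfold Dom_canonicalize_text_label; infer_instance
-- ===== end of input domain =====

-- B replaces A's map + join/split normalization by a single stateful pass and A's
-- explicit early-return alias loop by an idiomatic first-match selection (next/find?);
-- alternative decomposition, same asymptotic cost.


-- ===== PORT A =====
-- helper normalize_text: lowercase, emit char if alnum else ' ', then " ".join(….split())
def pyNormalizeText (text : String) : List Char :=
  let cleaned : List Char :=
    (PySem.Str.lower text).toList.foldl
      (fun acc c => acc ++ [if PySem.Chars.isalnum c then c else ' ']) []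
  PySem.Chars.join [' '] (PySem.Chars.split₀ cleaned)

-- the 'for label, aliases in alias_lookup' loop with its early return
def pyFindLabel (text : List Char) : List (String × List String) → Option String
  | [] => none
  | (label, aliases) :: rest =>
      if aliases.any (fun a => !a.toList.isEmpty && PySem.Chars.isIn a.toList text) then
        some label
      else pyFindLabel text rest

def canonicalize_text_label (raw_label : String) (alias_lookup : List (String × List String)) : Option String :=
  let text := pyNormalizeText raw_label
  if text.isEmpty then none
  else pyFindLabel text alias_lookup

-- ===== PORT B =====
-- one step of B's normalization loop: state = (chars, pending)
def altStep (st : List Char × Bool) (c : Char) : List Char × Bool :=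
  if PySem.Chars.isalnum c then
    ((if st.2 && !st.1.isEmpty then st.1 ++ [' '] else st.1) ++ [c], false)
  else (st.1, true)

def canonicalize_text_label_alt (raw_label : String) (alias_lookup : List (String × List String)) : Option String :=
  let chars := ((PySem.Str.lower raw_label).toList.foldl altStep ([], false)).1
  if chars.isEmpty then none
  else
    -- next((label for …), None) = first pair whose aliases match, mapped to its label
    (alias_lookup.find? (fun le =>
        le.2.any (fun a => !a.toList.isEmpty && PySem.Chars.isIn a.toList chars))).map (·.1)

-- ===== PRECONDITION & SPEC =====
def Spec_canonicalize_text_label (raw_label : String) (alias_lookup : List (String × List String)) (out : Option String) : Prop := out = canonicalize_text_label_alt raw_label alias_lookup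
instance (raw_label : String) (alias_lookup : List (String × List String)) (out : Option String) : Decidable (Spec_canonicalize_text_label raw_label alias_lookup out) := by unfold Spec_canonicalize_text_label; infer_instance

-- ===== CLAIM (what is proved, stated in full; the proofs are below) =====
def Claim_equal_canonicalize_text_label : Prop := ∀ (raw_label : String) (alias_lookup : List (String × List String)), Dom_canonicalize_text_label raw_label alias_lookup → Spec_canonicalize_text_label raw_label alias_lookup (canonicalize_text_label raw_label alias_lookup)

-- ===== LEMMAS AND PROOFS =====

-- the char A's cleaning loop emits
def cleanChar (c : Char) : Char := if PySem.Chars.isalnum c then c else ' '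

lemma isspace_of_isalnum {c : Char} (h : PySem.Chars.isalnum c = true) :
    PySem.Chars.isspace c = false := by
  simp only [PySem.Chars.isalnum, PySem.Chars.isalpha, PySem.Chars.isdigit, PySem.Chars.isupper,
    PySem.Chars.islower, PySem.Chars.isspace, Bool.or_eq_true, Bool.and_eq_true, decide_eq_true_eq,
    Char.le_def, UInt32.le_iff_toNat_le, Bool.or_eq_false_iff, Bool.and_eq_false_iff,
    decide_eq_false_iff_not, not_le, Char.toNat,
    show 'A'.val.toNat = 65 from rfl, show 'Z'.val.toNat = 90 from rfl,
    show 'a'.val.toNat = 97 from rfl, show 'z'.val.toNat = 122 from rfl,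
    show '0'.val.toNat = 48 from rfl, show '9'.val.toNat = 57 from rfl] at *
  omega

-- join over a snoc
lemma join_snoc (ws : List (List Char)) (w : List Char) :
    PySem.Chars.join [' '] (ws ++ [w]) =
      if ws = [] then w else PySem.Chars.join [' '] ws ++ [' '] ++ w := by
  induction ws with
  | nil => simp [PySem.Chars.join_singleton]
  | cons x t ih =>
    cases t with
    | nil => simp [PySem.Chars.join_cons_cons, PySem.Chars.join_singleton]
    | cons y t' =>
      simp only [List.cons_append, PySem.Chars.join_cons_cons] at *
      rw [ih]; simp

lemma join_ne_nil (accW : List (List Char)) (h : accW ≠ []) (hw : ∀ w ∈ accW, w ≠ []) :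
    PySem.Chars.join [' '] accW.reverse ≠ [] := by
  cases accW with
  | nil => exact absurd rfl h
  | cons a t =>
    simp only [List.reverse_cons]
    rw [join_snoc]
    split_ifs with h1
    · exact hw a (by simp)
    · simp

-- the coupled invariant between B's fold state and A's split₀.go state:
-- acc is the space-joined text of the words closed so far (accW, reversed) plus the open word cur,
-- and pend records whether a separator is owed before the next word.
lemma main_loop (l : List Char) : ∀ (cur : List Char) (accW : List (List Char)) (acc : List Char) (pend : Bool),
    acc = PySem.Chars.join [' ']
        (accW.reverse ++ (if cur = [] then [] else [cur.reverse])) →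
    (cur ≠ [] → pend = false) →
    (cur = [] → accW ≠ [] → pend = true) →
    (∀ w ∈ accW, w ≠ []) →
    (l.foldl altStep (acc, pend)).1 =
      PySem.Chars.join [' '] (PySem.Chars.split₀.go (l.map cleanChar) cur accW) := by
  induction l with
  | nil =>
    intro cur accW acc pend hacc hp1 hp2 hw
    simp only [List.foldl_nil, List.map_nil]
    show acc = _
    rw [show PySem.Chars.split₀.go [] cur accW =
      if cur.isEmpty then accW.reverse else (cur.reverse :: accW).reverse from rfl]
    cases cur with
    | nil => simpa using hacc
    | cons c t => simp only [List.isEmpty_cons, List.reverse_cons]; simpa using hacc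
  | cons c l ih =>
    intro cur accW acc pend hacc hp1 hp2 hw
    simp only [List.foldl_cons, List.map_cons]
    by_cases h : PySem.Chars.isalnum c = true
    · -- alnum char: extends the current word
      rw [show PySem.Chars.split₀.go (cleanChar c :: l.map cleanChar) cur accW =
            if PySem.Chars.isspace (cleanChar c) then
              (if cur.isEmpty then PySem.Chars.split₀.go (l.map cleanChar) [] accW
               else PySem.Chars.split₀.go (l.map cleanChar) [] (cur.reverse :: accW))
            else PySem.Chars.split₀.go (l.map cleanChar) (cleanChar c :: cur) accW from rfl]
      simp only [cleanChar, h, if_true, isspace_of_isalnum h, Bool.false_eq_true, if_false]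
      rw [show altStep (acc, pend) c =
        ((if pend && !acc.isEmpty then acc ++ [' '] else acc) ++ [c], false) by
          simp [altStep, h]]
      apply ih
      · -- the re-established join invariant
        cases cur with
        | cons d t =>
          have hpend := hp1 (by simp)
          subst hpend
          rw [hacc]
          simp only [Bool.false_and, Bool.false_eq_true, if_false, reduceCtorEq, List.reverse_cons]
          rw [join_snoc, join_snoc]
          split_ifs with hws
          · simp
          · simp
        | nil =>
          by_cases ha : accW = []
          · subst ha
            rw [hacc]
            simp [PySem.Chars.join, List.intercalate]
          · have hpend := hp2 rfl ha
            have hne : (PySem.Chars.join [' '] accW.reverse).isEmpty = false := by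
              simpa [List.isEmpty_iff] using join_ne_nil accW ha hw
            rw [hacc]
            simp only [hpend, reduceIte, List.append_nil, hne, Bool.not_false, Bool.and_self,
              List.reverse_cons, List.reverse_nil, List.nil_append]
            rw [if_neg (by simp), join_snoc]
            split_ifs with hws
            · exact absurd (by simpa using hws) ha
            · simp
      · intro _; rfl
      · intro hcontra; simp at hcontra
      · exact hw
    · -- non-alnum char: a pending separator
      rw [show PySem.Chars.split₀.go (cleanChar c :: l.map cleanChar) cur accW =
            if PySem.Chars.isspace (cleanChar c) then
              (if cur.isEmpty then PySem.Chars.split₀.go (l.map cleanChar) [] accW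
               else PySem.Chars.split₀.go (l.map cleanChar) [] (cur.reverse :: accW))
            else PySem.Chars.split₀.go (l.map cleanChar) (cleanChar c :: cur) accW from rfl]
      simp only [cleanChar, h]
      rw [show altStep (acc, pend) c = (acc, true) by simp [altStep, h]]
      cases cur with
      | nil =>
        simp only [List.isEmpty_nil, if_true]
        apply ih
        · simpa using hacc
        · intro hc; exact absurd rfl hc
        · intro _ ha; rfl
        · exact hw
      | cons d t =>
        simp only [List.isEmpty_cons]
        apply ih
        · simp only [List.reverse_cons]
          rw [hacc]; simp
        · intro hc; exact absurd rfl hc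
        · intro _ _; rfl
        · intro w hwm
          rcases List.mem_cons.mp hwm with h1 | h2
          · subst h1; simp
          · exact hw w h2

lemma norm_eq (s : String) :
    pyNormalizeText s = ((PySem.Str.lower s).toList.foldl altStep ([], false)).1 := by
  unfold pyNormalizeText
  rw [show (fun (acc : List Char) (c : Char) => acc ++ [if PySem.Chars.isalnum c then c else ' '])
      = (fun acc c => acc ++ [cleanChar c]) from rfl,
    PySem.List.foldl_append_singleton_eq_map]
  rw [main_loop _ [] [] [] false (by simp [PySem.Chars.join, List.intercalate]) (by simp)
    (by simp) (by simp)]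
  rfl

lemma search_eq (text : List Char) (l : List (String × List String)) :
    (l.find? (fun le =>
        le.2.any (fun a => !a.toList.isEmpty && PySem.Chars.isIn a.toList text))).map (·.1)
      = pyFindLabel text l := by
  induction l with
  | nil => rfl
  | cons x t ih =>
    obtain ⟨lab, als⟩ := x
    simp only [List.find?_cons, pyFindLabel]
    by_cases h : als.any (fun a => !a.toList.isEmpty && PySem.Chars.isIn a.toList text) = true
    · simp [h]
    · simp only [Bool.not_eq_true] at h
      simp [h, ih]

-- ===== VERDICT (by name: the statement is the Claim_ definition above) =====
theorem canonicalize_text_label_spec : Claim_equal_canonicalize_text_label := by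
  intro raw_label alias_lookup _
  unfold Spec_canonicalize_text_label canonicalize_text_label canonicalize_text_label_alt
  dsimp only
  rw [norm_eq, ← search_eq]
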